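-- pv_equiv track=rewrite | github.com/YueMiyuki/picoctf_writeups | secure-email-service/src/mt_solve.py | untemper
-- ===== SOURCE A (Python) =====
-- def untemper(y):
--     y &= 0xFFFFFFFF
--     y ^= y >> 18
--     y ^= (y << 15) & 0xEFC60000
--     tmp = y
--     for _ in range(3):
--         tmp = y ^ ((tmp << 7) & 0x9D2C5680)
--     y = y ^ ((tmp << 7) & 0x9D2C5680)
--     tmp = y
--     tmp = y ^ (tmp >> 11)
--     y = y ^ (tmp >> 11)
--     return y & 0xFFFFFFFF
-- ===== SOURCE B (Python) =====
-- # Tempering (and hence untempering) is linear over GF(2), so the inverse is a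
-- # precomputed 32x32 bit matrix: _T[i] is the untempered value of the unit word
-- # 1 << i, and untemper(y) is the XOR of the columns selected by y's bits.
-- _T = [
--     270681289, 2, 2165448768, 263304, 16, 67670322, 64, 274877641,
--     8392962, 2165317636, 33571848, 67405969, 201953586, 8196, 807814344,
--     1074299152, 2148598304, 2165449284, 270943305, 67666194, 2298684000,
--     270926024, 4196369, 76054832, 2165318212, 308415681, 75534610,
--     2299600932, 302138440, 604014609, 1275170866, 2148540932,
-- ]
--
-- def untemper(y):
--     y &= 0xFFFFFFFF
--     r = 0
--     t = y
--     for c in _T: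
--         if t & 1:
--             r ^= c
--         t >>= 1
--     return r
-- ===== Notes on version B (the rewrite author's own statement) =====
-- stated objective: alternative
-- what changed: Replaces the four shift/mask inversion steps (with their fixpoint iterations) by a single pass over a precomputed GF(2) basis table: untemper is linear, so B XORs the precomputed untempered unit words selected by the input's bits.
import Mathlib
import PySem

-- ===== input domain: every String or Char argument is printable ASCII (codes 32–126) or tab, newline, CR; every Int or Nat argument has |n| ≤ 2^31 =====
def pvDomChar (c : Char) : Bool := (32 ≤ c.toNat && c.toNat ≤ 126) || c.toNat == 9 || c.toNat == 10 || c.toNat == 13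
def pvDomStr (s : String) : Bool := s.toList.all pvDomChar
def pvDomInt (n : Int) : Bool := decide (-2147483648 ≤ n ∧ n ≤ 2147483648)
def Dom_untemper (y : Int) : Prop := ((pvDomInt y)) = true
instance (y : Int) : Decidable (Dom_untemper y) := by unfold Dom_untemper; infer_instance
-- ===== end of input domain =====

-- B replaces A's four whole-word shift/mask inversion steps by a single pass over a
-- precomputed GF(2) basis table (untempering is linear over GF(2)): alternative structure, same cost.

-- ===== PORT A =====
def untemper (y : Int) : Int :=
  let y := PySem.Int.band y 0xFFFFFFFF                                       -- y &= 0xFFFFFFFF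
  let y := PySem.Int.bxor y (y >>> (18 : Nat))                               -- y ^= y >> 18
  let y := PySem.Int.bxor y (PySem.Int.band (y <<< (15 : Nat)) 0xEFC60000)   -- y ^= (y << 15) & 0xEFC60000
  let tmp := y
  let tmp := (List.range 3).foldl                                            -- for _ in range(3): tmp = y ^ ((tmp << 7) & 0x9D2C5680)
    (fun t _ => PySem.Int.bxor y (PySem.Int.band (t <<< (7 : Nat)) 0x9D2C5680)) tmp
  let y := PySem.Int.bxor y (PySem.Int.band (tmp <<< (7 : Nat)) 0x9D2C5680)  -- y = y ^ ((tmp << 7) & 0x9D2C5680)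
  let tmp := y
  let tmp := PySem.Int.bxor y (tmp >>> (11 : Nat))                           -- tmp = y ^ (tmp >> 11)
  let y := PySem.Int.bxor y (tmp >>> (11 : Nat))                             -- y = y ^ (tmp >> 11)
  PySem.Int.band y 0xFFFFFFFF                                                -- return y & 0xFFFFFFFF

-- ===== PORT B =====
-- _T[i] = untempered value of the unit word 1 << i (precomputed offline)
def untemperTable : List Int :=
  [270681289, 2, 2165448768, 263304, 16, 67670322, 64, 274877641, 8392962, 2165317636,
   33571848, 67405969, 201953586, 8196, 807814344, 1074299152, 2148598304, 2165449284,
   270943305, 67666194, 2298684000, 270926024, 4196369, 76054832, 2165318212, 308415681,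
   75534610, 2299600932, 302138440, 604014609, 1275170866, 2148540932]

def untemper_alt (y : Int) : Int :=
  let y := PySem.Int.band y 0xFFFFFFFF                                       -- y &= 0xFFFFFFFF
  let p := untemperTable.foldl                                               -- for c in _T: if t & 1: r ^= c; t >>= 1
    (fun (p : Int × Int) c =>
      (if PySem.Int.band p.2 1 ≠ 0 then PySem.Int.bxor p.1 c else p.1, p.2 >>> (1 : Nat)))
    (0, y)
  p.1                                                                        -- return r

-- ===== PRECONDITION & SPEC =====
def Spec_untemper (y : Int) (out : Int) : Prop := out = untemper_alt y
instance (y : Int) (out : Int) : Decidable (Spec_untemper y out) := by unfold Spec_untemper; infer_instance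

-- ===== CLAIM (what is proved, stated in full; the proofs are below) =====
def Claim_equal_untemper : Prop := ∀ (y : Int), Dom_untemper y → Spec_untemper y (untemper y)

-- ===== LEMMAS AND PROOFS =====

-- Nat-level mirror of A's chain after the initial mask
def pvL7 (n : Nat) : Nat := (n <<< 7) &&& 0x9D2C5680
def pvS18 (n : Nat) : Nat := n ^^^ (n >>> 18)
def pvS15 (n : Nat) : Nat := n ^^^ ((n <<< 15) &&& 0xEFC60000)
def pvS7 (n : Nat) : Nat := n ^^^ pvL7 (n ^^^ pvL7 (n ^^^ pvL7 (n ^^^ pvL7 n)))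
def pvS11 (n : Nat) : Nat := n ^^^ ((n ^^^ (n >>> 11)) >>> 11)
def pvFA (n : Nat) : Nat := pvS11 (pvS7 (pvS15 (pvS18 n))) &&& 0xFFFFFFFF

-- Nat-level table and accumulator of B's loop
def pvTN : List Nat :=
  [270681289, 2, 2165448768, 263304, 16, 67670322, 64, 274877641, 8392962, 2165317636,
   33571848, 67405969, 201953586, 8196, 807814344, 1074299152, 2148598304, 2165449284,
   270943305, 67666194, 2298684000, 270926024, 4196369, 76054832, 2165318212, 308415681,
   75534610, 2299600932, 302138440, 604014609, 1275170866, 2148540932]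

def pvW : List Nat → Nat → Nat
  | [], _ => 0
  | c :: cs, t => (if t &&& 1 ≠ 0 then c else 0) ^^^ pvW cs (t >>> 1)

-- the initial mask always produces a natural number below 2^32
lemma pv_mask (y : Int) : ∃ n : Nat, n < 4294967296 ∧ PySem.Int.band y 4294967295 = (n : Int) := by
  unfold PySem.Int.band
  split_ifs with h1 h2
  · exact ⟨y.toNat &&& (4294967295:Int).toNat,
      by have := @Nat.and_le_right y.toNat (4294967295:Int).toNat; omega, rfl⟩
  · omega
  · exact ⟨(4294967295:Int).toNat - ((4294967295:Int).toNat &&& (-y - 1).toNat), by omega, rfl⟩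
  · omega

-- A's Int chain on a masked word is the Nat chain pvFA
lemma pv_A_cast (y : Int) (n : Nat) (h : PySem.Int.band y 4294967295 = (n : Int)) :
    untemper y = ((pvFA n : Nat) : Int) := by
  unfold untemper
  rw [show (0xFFFFFFFF : Int) = ((4294967295 : Nat) : Int) from rfl] at h ⊢
  rw [h]
  simp only [List.range_succ, List.range_zero, List.foldl_append, List.foldl_cons, List.foldl_nil,
    ← Int.natCast_shiftRight, ← Int.natCast_shiftLeft,
    show (0xEFC60000 : Int) = ((0xEFC60000 : Nat) : Int) from rfl,
    show (0x9D2C5680 : Int) = ((0x9D2C5680 : Nat) : Int) from rfl,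
    PySem.Int.band_natCast, PySem.Int.bxor_natCast]
  norm_cast

-- B's Int loop on a masked word is the Nat accumulator pvW
lemma pv_fold_cast : ∀ (cs : List Nat) (r t : Nat),
    (((cs.map (Nat.cast : Nat → Int)).foldl
      (fun (p : Int × Int) c =>
        (if PySem.Int.band p.2 1 ≠ 0 then PySem.Int.bxor p.1 c else p.1, p.2 >>> (1 : Nat)))
      ((r : Int), (t : Int))).1 : Int) = ((r ^^^ pvW cs t : Nat) : Int) := by
  intro cs
  induction cs with
  | nil => intro r t; simp [pvW]
  | cons c cs ih =>
    intro r t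
    simp only [List.map_cons, List.foldl_cons, pvW]
    rw [show ((t : Int) >>> (1:Nat)) = ((t >>> 1 : Nat) : Int) from (Int.natCast_shiftRight t 1).symm,
        show PySem.Int.band (t : Int) 1 = ((t &&& 1 : Nat) : Int) from PySem.Int.band_natCast t 1]
    by_cases hb : t &&& 1 = 0
    · simp only [hb, Nat.cast_zero, ne_eq, not_true_eq_false, if_false]
      rw [ih r (t >>> 1)]
      simp
    · simp only [ne_eq, Nat.cast_eq_zero, hb, not_false_eq_true, if_true,
        PySem.Int.bxor_natCast]
      rw [ih (r ^^^ c) (t >>> 1), Nat.xor_assoc]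

lemma pv_B_cast (y : Int) (n : Nat) (h : PySem.Int.band y 4294967295 = (n : Int)) :
    untemper_alt y = ((pvW pvTN n : Nat) : Int) := by
  unfold untemper_alt
  rw [show (0xFFFFFFFF : Int) = ((4294967295 : Nat) : Int) from rfl] at h ⊢
  rw [h, show untemperTable = pvTN.map (Nat.cast : Nat → Int) from rfl]
  simpa using pv_fold_cast pvTN 0 n

-- xor distributes over the word operations, so each of A's steps is GF(2)-linear
lemma pv_xor_shiftRight (a b s : Nat) : (a ^^^ b) >>> s = (a >>> s) ^^^ (b >>> s) := by
  apply Nat.eq_of_testBit_eq; intro i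
  simp [Nat.testBit_shiftRight, Nat.testBit_xor]

lemma pv_xor_shiftLeft (a b s : Nat) : (a ^^^ b) <<< s = (a <<< s) ^^^ (b <<< s) := by
  apply Nat.eq_of_testBit_eq; intro i
  simp [Nat.testBit_shiftLeft, Nat.testBit_xor, Bool.and_xor_distrib_left]

lemma pvL7_lin (a b : Nat) : pvL7 (a ^^^ b) = pvL7 a ^^^ pvL7 b := by
  simp [pvL7, pv_xor_shiftLeft, Nat.and_xor_distrib_right]

lemma pvS18_lin (a b : Nat) : pvS18 (a ^^^ b) = pvS18 a ^^^ pvS18 b := by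
  simp only [pvS18, pv_xor_shiftRight]
  simp [Nat.xor_assoc, Nat.xor_comm, Nat.xor_left_comm]

lemma pvS15_lin (a b : Nat) : pvS15 (a ^^^ b) = pvS15 a ^^^ pvS15 b := by
  simp only [pvS15, pv_xor_shiftLeft, Nat.and_xor_distrib_right]
  simp [Nat.xor_assoc, Nat.xor_comm, Nat.xor_left_comm]

lemma pvS7_lin (a b : Nat) : pvS7 (a ^^^ b) = pvS7 a ^^^ pvS7 b := by
  simp only [pvS7, pvL7_lin]
  simp [Nat.xor_assoc, Nat.xor_comm, Nat.xor_left_comm]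

lemma pvS11_lin (a b : Nat) : pvS11 (a ^^^ b) = pvS11 a ^^^ pvS11 b := by
  simp only [pvS11, pv_xor_shiftRight]
  simp [Nat.xor_assoc, Nat.xor_comm, Nat.xor_left_comm]

lemma pvFA_lin (a b : Nat) : pvFA (a ^^^ b) = pvFA a ^^^ pvFA b := by
  simp only [pvFA, pvS18_lin, pvS15_lin, pvS7_lin, pvS11_lin, Nat.and_xor_distrib_right]

-- splitting the lowest bit off a shifted word
lemma pv_decomp (t k : Nat) : ((t &&& 1) <<< k) ^^^ ((t >>> 1) <<< (k + 1)) = t <<< k := by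
  apply Nat.eq_of_testBit_eq; intro i
  simp only [Nat.testBit_xor, Nat.testBit_shiftLeft, Nat.testBit_shiftRight, Nat.testBit_and]
  rcases Nat.lt_trichotomy i k with h | h | h
  · simp [Nat.not_le.mpr h, show ¬ (i ≥ k + 1) by omega]
  · subst h
    simp [show ¬ (i ≥ i + 1) by omega, Nat.testBit]
  · have h1 : i ≥ k := by omega
    have h2 : i ≥ k + 1 := by omega
    have h4 : Nat.testBit 1 (i - k) = false := by
      rw [show (1:Nat) = 2^0 by rfl, Nat.testBit_two_pow]
      simp; omega
    have h5 : 1 + (i - (k + 1)) = i - k := by omega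
    simp [h1, h2, h4, h5]

-- B's accumulator over a basis table computes pvFA of the shifted word
lemma pv_key : ∀ (cs : List Nat) (k t : Nat),
    (∀ j, j < cs.length → cs.getD j 0 = pvFA (1 <<< (k + j))) → t < 2 ^ cs.length →
    pvW cs t = pvFA (t <<< k) := by
  intro cs
  induction cs with
  | nil =>
    intro k t _ ht
    have : t = 0 := by simpa using Nat.lt_one_iff.mp ht
    subst this
    rw [Nat.zero_shiftLeft]
    rfl
  | cons c cs ih =>
    intro k t hbasis ht
    have hrec : pvW cs (t >>> 1) = pvFA ((t >>> 1) <<< (k + 1)) := by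
      apply ih (k + 1) (t >>> 1)
      · intro j hj
        have := hbasis (j + 1) (by simpa using Nat.succ_lt_succ hj)
        simpa [Nat.add_assoc, Nat.add_comm 1 j] using this
      · have hlen : (2:Nat) ^ (c :: cs).length = 2 * 2 ^ cs.length := by
          simp [List.length_cons, Nat.pow_succ, Nat.mul_comm]
        rw [Nat.shiftRight_eq_div_pow]
        omega
    rw [show pvW (c :: cs) t = (if t &&& 1 ≠ 0 then c else 0) ^^^ pvW cs (t >>> 1) from rfl,
        hrec, ← pv_decomp t k, pvFA_lin]
    by_cases hb : t &&& 1 = 0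
    · simp [hb, Nat.zero_shiftLeft, show pvFA 0 = 0 from rfl]
    · have hb1 : t &&& 1 = 1 := by have := Nat.and_one_is_mod t; omega
      have hc : c = pvFA (1 <<< k) := by simpa using hbasis 0 (by simp)
      simp [hb1, hc]

-- the table really is pvFA on the 32 unit words, so both sides agree on masked words
lemma pv_main (n : Nat) (hn : n < 4294967296) : pvFA n = pvW pvTN n := by
  have h := pv_key pvTN 0 n (by decide) (by simpa [pvTN] using hn)
  rw [Nat.shiftLeft_zero] at h
  exact h.symm

-- ===== VERDICT (by name: the statement is the Claim_ definition above) =====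
theorem untemper_spec : Claim_equal_untemper := by
  intro y _
  obtain ⟨n, hn, h⟩ := pv_mask y
  unfold Spec_untemper
  rw [pv_A_cast y n h, pv_B_cast y n h, pv_main n hn]
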